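-- pv_equiv track=rewrite | github.com/trigodeepak/Programming | Stock buy and sell.py | result
-- ===== SOURCE A (Python) =====
-- def result(a,n):
--     ans = []
--     i = 0
--     while i < n:
--         j = i+1
--         while j<n and a[j-1] < a[j]:
--             j+=1
--             if j == n:
--                 ans.append([i,j-1])
--                 return ans
--         if (j-1 > i):
--             ans.append([i,j-1])
--         i = j
--     return ans
-- ===== SOURCE B (Python) =====
-- def result(a, n):
--     # Classify indices independently: a buy point is a strict local minimum of the
--     # prefix a[:n] (start of an ascent), a sell point a strict local maximum (end of
--     # an ascent); ascents alternate buy/sell, so pairing the two lists positionally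
--     # with zip yields exactly the buy/sell intervals.
--     buys = [i for i in range(n - 1) if (i == 0 or not a[i - 1] < a[i]) and a[i] < a[i + 1]]
--     sells = [j for j in range(1, n) if a[j - 1] < a[j] and (j == n - 1 or not a[j] < a[j + 1])]
--     return [[b, s] for b, s in zip(buys, sells)]
-- ===== Notes on version B (the rewrite author's own statement) =====
-- stated objective: simpler
-- what changed: B drops A's stateful nested-while sweep entirely: it classifies each index independently as a buy point (strict local minimum) or sell point (strict local maximum) with two comprehensions and pairs the two lists positionally with zip.
import Mathlib
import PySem

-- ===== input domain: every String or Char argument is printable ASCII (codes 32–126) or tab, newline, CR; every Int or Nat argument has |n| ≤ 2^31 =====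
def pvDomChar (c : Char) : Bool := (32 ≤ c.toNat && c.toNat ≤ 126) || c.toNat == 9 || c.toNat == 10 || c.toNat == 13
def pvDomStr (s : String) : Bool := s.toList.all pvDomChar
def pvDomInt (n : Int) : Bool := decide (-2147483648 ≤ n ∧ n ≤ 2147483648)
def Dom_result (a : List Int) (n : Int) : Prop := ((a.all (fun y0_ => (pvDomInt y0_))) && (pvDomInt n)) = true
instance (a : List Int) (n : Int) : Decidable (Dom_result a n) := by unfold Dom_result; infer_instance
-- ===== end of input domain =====

-- B replaces A's stateful nested-while sweep by classifying each index independently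
-- as a buy point (strict local minimum) / sell point (strict local maximum) and zipping
-- the two lists positionally; same cost, different algorithm shape ("simpler").
-- pvLtAt a k totalizes the Python comparison a[k] < a[k+1] (out-of-range = False; both
-- sources only ever evaluate it where the indices are valid, inside Pre_).
def pvLtAt (a : List Int) (k : Int) : Bool :=
  match PySem.List.pyGet? a k, PySem.List.pyGet? a (k + 1) with
  | some x, some y => decide (x < y)
  | _, _ => false

-- ===== PORT A =====
-- inner 'while j<n and a[j-1]<a[j]' loop; the Bool is the early-return flag set when j reaches n inside the loop
def pvInnerA (a : List Int) (n j : Int) : Int × Bool :=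
  if _h : j < n then
    if pvLtAt a (j - 1) then
      if j + 1 = n then (j + 1, true)
      else pvInnerA a n (j + 1)
    else (j, false)
  else (j, false)
termination_by (n - j).toNat
decreasing_by omega

theorem pvInnerA_ge (a : List Int) (n j : Int) : j ≤ (pvInnerA a n j).1 := by
  unfold pvInnerA
  split
  · split
    · split
      · simp
      · have := pvInnerA_ge a n (j + 1); omega
    · simp
  · simp
termination_by (n - j).toNat
decreasing_by omega

def pvOuterA (a : List Int) (n i : Int) (ans : List (List Int)) : List (List Int) :=
  if _h : i < n then
    if (pvInnerA a n (i + 1)).2 then ans ++ [[i, (pvInnerA a n (i + 1)).1 - 1]]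
    else pvOuterA a n (pvInnerA a n (i + 1)).1
           (if (pvInnerA a n (i + 1)).1 - 1 > i then ans ++ [[i, (pvInnerA a n (i + 1)).1 - 1]] else ans)
  else ans
termination_by (n - i).toNat
decreasing_by
  have := pvInnerA_ge a n (i + 1); omega

def result (a : List Int) (n : Int) : List (List Int) := pvOuterA a n 0 []

-- ===== PORT B =====
-- '(i == 0 or not a[i-1] < a[i]) and a[i] < a[i+1]' — buy point (strict local minimum)
def pvBuy (a : List Int) (i : Int) : Bool := (i == 0 || !pvLtAt a (i - 1)) && pvLtAt a i
-- 'a[j-1] < a[j] and (j == n-1 or not a[j] < a[j+1])' — sell point (strict local maximum)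
def pvSell (a : List Int) (n j : Int) : Bool := pvLtAt a (j - 1) && (j == n - 1 || !pvLtAt a j)

def result_alt (a : List Int) (n : Int) : List (List Int) :=
  List.zipWith (fun b s => [b, s])
    ((PySem.List.pyRange 0 (n - 1) 1).filter (pvBuy a))
    ((PySem.List.pyRange 1 n 1).filter (pvSell a n))

-- ===== PRECONDITION & SPEC =====
-- Pre_: exactly the inputs where the Python A returns; for n > max(len(a), 1) A raises IndexError (so does B).
def Pre_result (a : List Int) (n : Int) : Prop := n ≤ a.length ∨ n ≤ 1
instance (a : List Int) (n : Int) : Decidable (Pre_result a n) := by unfold Pre_result; infer_instance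
def pvWitness_result : List Int × Int := ([1, 2, 3, 1, 5], 5)

def Spec_result (a : List Int) (n : Int) (out : List (List Int)) : Prop := out = result_alt a n
instance (a : List Int) (n : Int) (out : List (List Int)) : Decidable (Spec_result a n out) := by unfold Spec_result; infer_instance

-- ===== CLAIM (what is proved, stated in full; the proofs are below) =====
def Claim_equal_result : Prop := ∀ (a : List Int) (n : Int), Dom_result a n → Pre_result a n → Spec_result a n (result a n)

-- ===== LEMMAS AND PROOFS =====

-- proof-only views of B's two filtered lists, with the range's lower end generalized
def buysFrom (a : List Int) (n i : Int) : List Int :=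
  (PySem.List.pyRange i (n - 1) 1).filter (pvBuy a)
def sellsFrom (a : List Int) (n i : Int) : List Int :=
  (PySem.List.pyRange (i + 1) n 1).filter (pvSell a n)

theorem filter_skip (P : Int → Bool) (lo mid hi : Int) (h : lo ≤ mid)
    (hP : ∀ k, lo ≤ k → k < mid → P k = false) :
    (PySem.List.pyRange lo hi 1).filter P = (PySem.List.pyRange mid hi 1).filter P := by
  by_cases hlm : lo = mid
  · rw [hlm]
  · by_cases hhi : lo < hi
    · rw [PySem.List.pyRange_one_cons hhi, List.filter_cons,
        if_neg (by simp [hP lo le_rfl (by omega)])]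
      exact filter_skip P (lo + 1) mid hi (by omega) (fun k h1 h2 => hP k (by omega) h2)
    · rw [PySem.List.pyRange_one_eq_nil (by omega), PySem.List.pyRange_one_eq_nil (by omega)]
termination_by (mid - lo).toNat
decreasing_by omega

theorem filter_cons (P : Int → Bool) (lo hi : Int) (h : lo < hi) (hP : P lo = true) :
    (PySem.List.pyRange lo hi 1).filter P = lo :: (PySem.List.pyRange (lo + 1) hi 1).filter P := by
  rw [PySem.List.pyRange_one_cons h, List.filter_cons, if_pos (by simp [hP])]

-- characterization of A's inner while loop, entered at j with a rising gap just before j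
theorem innerA_spec (a : List Int) (n j : Int) (hjn : j < n) (hlt : pvLtAt a (j - 1) = true) :
    j + 1 ≤ (pvInnerA a n j).1 ∧ (pvInnerA a n j).1 ≤ n ∧
    (∀ k, j - 1 ≤ k → k ≤ (pvInnerA a n j).1 - 2 → pvLtAt a k = true) ∧
    (if (pvInnerA a n j).1 = n then (pvInnerA a n j).2 = true
     else (pvInnerA a n j).2 = false ∧ pvLtAt a ((pvInnerA a n j).1 - 1) = false) := by
  rw [pvInnerA, dif_pos hjn, if_pos hlt]
  by_cases hE : j + 1 = n
  · rw [if_pos hE]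
    refine ⟨le_rfl, by omega, ?_, by simp [hE]⟩
    intro k h1 h2
    have : k = j - 1 := by omega
    rw [this]; exact hlt
  · rw [if_neg hE]
    by_cases hlt2 : pvLtAt a j = true
    · have IH := innerA_spec a n (j + 1) (by omega) (by simpa using hlt2)
      refine ⟨by omega, IH.2.1, ?_, IH.2.2.2⟩
      intro k h1 h2
      by_cases hk : k = j - 1
      · rw [hk]; exact hlt
      · exact IH.2.2.1 k (by omega) (by omega)
    · have hItail : pvInnerA a n (j + 1) = (j + 1, false) := by
        rw [pvInnerA, dif_pos (by omega : j + 1 < n)]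
        have : j + 1 - 1 = j := by omega
        rw [this, if_neg hlt2]
      rw [hItail]
      refine ⟨le_rfl, by omega, ?_, ?_⟩
      · intro k h1 h2
        have : k = j - 1 := by omega
        rw [this]; exact hlt
      · rw [if_neg (by simpa using hE)]
        have : j + 1 - 1 = j := by omega
        rw [this]
        exact ⟨rfl, by simpa using hlt2⟩
termination_by (n - j).toNat
decreasing_by omega

-- main simulation: A's outer loop, started at a run boundary i, emits exactly the zip of
-- B's remaining buy and sell points
theorem main_sim (a : List Int) (n i : Int) (ans : List (List Int)) (h0 : 0 ≤ i)
    (hb : i = 0 ∨ pvLtAt a (i - 1) = false) :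
    pvOuterA a n i ans =
      ans ++ List.zipWith (fun b s => [b, s]) (buysFrom a n i) (sellsFrom a n i) := by
  by_cases hi : i < n
  · by_cases hin : i < n - 1
    · by_cases hlt : pvLtAt a i = true
      · -- a run starts at i
        have hspec := innerA_spec a n (i + 1) (by omega) (by simpa using hlt)
        set J := (pvInnerA a n (i + 1)).1 with hJ
        obtain ⟨hJ1, hJ2, hall, hflag⟩ := hspec
        have hall' : ∀ k, i ≤ k → k ≤ J - 2 → pvLtAt a k = true := by
          intro k h1 h2; exact hall k (by omega) h2
        have hbuys : buysFrom a n i = i :: buysFrom a n J := by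
          unfold buysFrom
          rw [filter_cons _ _ _ hin (by
            unfold pvBuy
            rcases hb with hb | hb
            · rw [hb] at hlt ⊢; simp [hlt]
            · simp [hb, hlt])]
          rw [filter_skip (pvBuy a) (i + 1) J (n - 1) (by omega) ?_]
          intro k h1 h2
          unfold pvBuy
          have : pvLtAt a (k - 1) = true := hall' (k - 1) (by omega) (by omega)
          simp [this, show ¬ (k = 0) by omega]
        have hsells : sellsFrom a n i = (J - 1) :: (PySem.List.pyRange J n 1).filter (pvSell a n) := by
          unfold sellsFrom
          rw [filter_skip (pvSell a n) (i + 1) (J - 1) n (by omega) ?_]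
          · rw [filter_cons _ _ _ (by omega : J - 1 < n) (by
              unfold pvSell
              have h1 : pvLtAt a (J - 2) = true := hall' (J - 2) (by omega) (by omega)
              rw [show J - 1 - 1 = J - 2 by omega, h1]
              by_cases hJn : J = n
              · simp [hJn]
              · rw [if_neg hJn] at hflag
                simp [hflag.2])]
            rw [show J - 1 + 1 = J by omega]
          · intro k h1 h2
            unfold pvSell
            have : pvLtAt a k = true := hall' k (by omega) (by omega)
            simp [this, show ¬ (k = n - 1) by omega]
        have hstail : (PySem.List.pyRange J n 1).filter (pvSell a n) = sellsFrom a n J := by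
          unfold sellsFrom
          by_cases hJn : J = n
          · rw [PySem.List.pyRange_one_eq_nil (by omega), PySem.List.pyRange_one_eq_nil (by omega)]
          · rw [if_neg hJn] at hflag
            refine filter_skip (pvSell a n) J (J + 1) n (by omega) ?_
            intro k h1 h2
            have hk : k = J := by omega
            unfold pvSell
            rw [hk]
            simp [hflag.2]
        rw [pvOuterA, dif_pos hi, ← hJ]
        by_cases hJn : J = n
        · -- early return: j reached n inside the inner loop
          rw [if_pos (by rw [if_pos hJn] at hflag; exact hflag)]
          rw [hbuys, hsells]
          have : buysFrom a n J = [] := by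
            unfold buysFrom
            rw [PySem.List.pyRange_one_eq_nil (by omega), List.filter_nil]
          rw [this]
          simp
        · rw [if_neg (by rw [if_neg hJn] at hflag; simp [hflag.1])]
          rw [if_pos (by omega : J - 1 > i)]
          rw [if_neg hJn] at hflag
          rw [main_sim a n J _ (by omega) (Or.inr hflag.2)]
          rw [hbuys, hsells, hstail]
          simp
      · -- no ascent at i: step to i+1
        have hI : pvInnerA a n (i + 1) = (i + 1, false) := by
          rw [pvInnerA, dif_pos (by omega : i + 1 < n)]
          rw [show i + 1 - 1 = i by omega, if_neg hlt]
        rw [pvOuterA, dif_pos hi, hI]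
        simp only [Bool.false_eq_true, if_false]
        rw [if_neg (by omega : ¬ (i + 1 - 1 > i))]
        rw [main_sim a n (i + 1) ans (by omega) (Or.inr (by rw [show i + 1 - 1 = i by omega]; simpa using hlt))]
        have hbuys : buysFrom a n i = buysFrom a n (i + 1) := by
          refine filter_skip (pvBuy a) i (i + 1) (n - 1) (by omega) ?_
          intro k h1 h2
          have hk : k = i := by omega
          unfold pvBuy
          simp [hk, hlt]
        have hsells : sellsFrom a n i = sellsFrom a n (i + 1) := by
          refine filter_skip (pvSell a n) (i + 1) (i + 1 + 1) n (by omega) ?_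
          intro k h1 h2
          have hk : k = i + 1 := by omega
          unfold pvSell
          rw [hk, show i + 1 - 1 = i by omega]
          simp [hlt]
        rw [hbuys, hsells]
    · -- i = n - 1: the last index starts no interval
      have hI : pvInnerA a n (i + 1) = (i + 1, false) := by
        rw [pvInnerA, dif_neg (by omega)]
      rw [pvOuterA, dif_pos hi, hI]
      simp only [Bool.false_eq_true, if_false]
      rw [if_neg (by omega : ¬ (i + 1 - 1 > i))]
      rw [pvOuterA, dif_neg (by omega)]
      have : buysFrom a n i = [] := by
        unfold buysFrom
        rw [PySem.List.pyRange_one_eq_nil (by omega), List.filter_nil]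
      rw [this]
      simp
  · rw [pvOuterA, dif_neg hi]
    have : buysFrom a n i = [] := by
      unfold buysFrom
      rw [PySem.List.pyRange_one_eq_nil (by omega), List.filter_nil]
    rw [this]
    simp
termination_by (n - i).toNat
decreasing_by
  · have := pvInnerA_ge a n (i + 1); omega
  · omega

-- ===== VERDICT (by name: the statement is the Claim_ definition above) =====
theorem result_spec : Claim_equal_result := by
  intro a n _dom _pre
  unfold Spec_result result result_alt
  rw [main_sim a n 0 [] le_rfl (Or.inl rfl)]
  unfold buysFrom sellsFrom
  norm_num
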